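-- pv_equiv track=rewrite | github.com/Rishi098/Advance_Python_Programs | Score of Good Pairs.py | findScoreSum
-- ===== SOURCE A (Python) =====
-- from collections import defaultdict
--
-- def findScoreSum(nums):
--     value_map = defaultdict(lambda: {'count': 0, 'sum_indices': 0})
--     total_score = 0
--
--     for i, val in enumerate(nums):
--         count = value_map[val]['count']
--         sum_indices = value_map[val]['sum_indices']
--
--
--         total_score += count * i - sum_indices
--
--
--         value_map[val]['count'] += 1
--         value_map[val]['sum_indices'] += i
--
--     return total_score
-- ===== SOURCE B (Python) =====
-- def findScoreSum(nums):
--     # Group the indices of each value, then compute each group's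
--     # contribution in a separate per-group pass.
--     groups = {}
--     for i, v in enumerate(nums):
--         groups.setdefault(v, []).append(i)
--     total = 0
--     for v in groups:
--         k = 0
--         pref = 0
--         for idx in groups[v]:
--             total += k * idx - pref
--             pref += idx
--             k += 1
--     return total
-- ===== Notes on version B (the rewrite author's own statement) =====
-- stated objective: alternative
-- what changed: B replaces A's single online pass (per-value running count/index-sum updated while accumulating) with an explicit build-then-process: one pass groups the indices of each value into lists, then a separate per-group pass computes each group's contribution as a running sum of k*idx - prefix_sum.
import Mathlib
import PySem

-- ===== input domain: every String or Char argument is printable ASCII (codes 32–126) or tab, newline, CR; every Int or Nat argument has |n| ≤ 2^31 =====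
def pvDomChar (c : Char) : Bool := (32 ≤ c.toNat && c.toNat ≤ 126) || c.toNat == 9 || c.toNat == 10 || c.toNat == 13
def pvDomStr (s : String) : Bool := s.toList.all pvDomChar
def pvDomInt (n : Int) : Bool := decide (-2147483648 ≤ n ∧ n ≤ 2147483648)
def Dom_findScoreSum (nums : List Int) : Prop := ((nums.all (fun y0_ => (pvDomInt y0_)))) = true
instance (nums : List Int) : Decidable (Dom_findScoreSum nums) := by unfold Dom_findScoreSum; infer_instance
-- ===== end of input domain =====

-- B groups each value's indices in one dict-building pass and then sums each
-- group's contribution k*idx - prefix_sum in a separate per-group pass,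
-- instead of A's single online accumulation (objective: alternative).

-- ===== PORT A =====
def findScoreSum (nums : List Int) : Int :=
  ((PySem.List.enumerate nums).foldl
    (fun (st : PySem.Dict Int (Int × Int) × Int) p =>
      let count := (st.1.getD p.2 (0, 0)).1
      let sumIndices := (st.1.getD p.2 (0, 0)).2
      (st.1.insert p.2 (count + 1, sumIndices + p.1), st.2 + (count * p.1 - sumIndices)))
    (PySem.Dict.empty, 0)).2

-- ===== PORT B =====
def findScoreSum_alt (nums : List Int) : Int :=
  let groups : PySem.Dict Int (List Int) :=
    (PySem.List.enumerate nums).foldl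
      (fun d p => d.modify p.2 [] (fun l => l ++ [p.1])) PySem.Dict.empty
  groups.keys.foldl
    (fun total v =>
      ((groups.getD v []).foldl
        (fun (st : Int × Int × Int) idx =>
          (st.1 + 1, st.2.1 + idx, st.2.2 + (st.1 * idx - st.2.1)))
        (0, 0, total)).2.2)
    0

-- ===== PRECONDITION & SPEC =====
def Spec_findScoreSum (nums : List Int) (out : Int) : Prop := out = findScoreSum_alt nums
instance (nums : List Int) (out : Int) : Decidable (Spec_findScoreSum nums out) := by unfold Spec_findScoreSum; infer_instance

-- ===== CLAIM (what is proved, stated in full; the proofs are below) =====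
def Claim_equal_findScoreSum : Prop := ∀ (nums : List Int), Dom_findScoreSum nums → Spec_findScoreSum nums (findScoreSum nums)

-- ===== LEMMAS AND PROOFS =====

-- the list of indices at which value v occurs in nums (in increasing order)
def gidx (nums : List Int) (v : Int) : List Int :=
  ((PySem.List.enumerate nums).filter (fun p => p.2 == v)).map (fun p => p.1)

-- A's fold step and fold, named for the proofs (definitinally what findScoreSum folds)
def stepA (st : PySem.Dict Int (Int × Int) × Int) (p : Int × Int) :
    PySem.Dict Int (Int × Int) × Int :=
  let count := (st.1.getD p.2 (0, 0)).1
  let sumIndices := (st.1.getD p.2 (0, 0)).2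
  (st.1.insert p.2 (count + 1, sumIndices + p.1), st.2 + (count * p.1 - sumIndices))

def foldA (nums : List Int) : PySem.Dict Int (Int × Int) × Int :=
  (PySem.List.enumerate nums).foldl stepA (PySem.Dict.empty, 0)

-- B's inner loop step
def innerStep (st : Int × Int × Int) (idx : Int) : Int × Int × Int :=
  (st.1 + 1, st.2.1 + idx, st.2.2 + (st.1 * idx - st.2.1))

-- per-group contribution
def G (nums : List Int) (v : Int) : Int :=
  ((gidx nums v).foldl innerStep (0, 0, 0)).2.2

lemma findScoreSum_eq_foldA (nums : List Int) : findScoreSum nums = (foldA nums).2 := rfl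

lemma gidx_append (l : List Int) (x v : Int) :
    gidx (l ++ [x]) v = gidx l v ++ (if x = v then [(l.length : Int)] else []) := by
  unfold gidx
  rw [PySem.List.enumerate_append]
  by_cases h : x = v <;>
    simp [PySem.List.enumerate, List.filter_append, h]

lemma gidx_nil_of_not_mem (l : List Int) (x : Int) (hx : x ∉ l) : gidx l x = [] := by
  unfold gidx
  rw [List.map_eq_nil_iff, List.filter_eq_nil_iff]
  intro p hp
  rcases (PySem.List.mem_enumerate_iff _ _ _).1 hp with ⟨k, hk, rfl⟩
  simp only [beq_iff_eq]
  intro h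
  exact hx (h ▸ List.getElem_mem hk)

lemma inner_fst_snd (idxs : List Int) : ∀ (k p t : Int),
    (idxs.foldl innerStep (k, p, t)).1 = k + idxs.length ∧
    (idxs.foldl innerStep (k, p, t)).2.1 = p + idxs.sum := by
  induction idxs with
  | nil => intro k p t; simp
  | cons a as ih =>
    intro k p t
    simp only [List.foldl_cons, innerStep]
    obtain ⟨h1, h2⟩ := ih (k + 1) (p + a) (t + (k * a - p))
    refine ⟨?_, ?_⟩
    · rw [h1]; simp only [List.length_cons]; push_cast; ring
    · rw [h2]; simp only [List.sum_cons]; ring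

lemma inner_total_add (idxs : List Int) : ∀ (k p t s : Int),
    (idxs.foldl innerStep (k, p, t + s)).2.2 = s + (idxs.foldl innerStep (k, p, t)).2.2 := by
  induction idxs with
  | nil => intro k p t s; simp; ring
  | cons a as ih =>
    intro k p t s
    simp only [List.foldl_cons, innerStep]
    have : t + s + (k * a - p) = (t + (k * a - p)) + s := by ring
    rw [this, ih]

lemma outer_fold (g : Int → List Int) (s : List Int) : ∀ (t : Int),
    s.foldl (fun total v => ((g v).foldl innerStep (0, 0, total)).2.2) t
      = t + (s.map (fun v => ((g v).foldl innerStep (0, 0, 0)).2.2)).sum := by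
  induction s with
  | nil => intro t; simp
  | cons a as ih =>
    intro t
    simp only [List.foldl_cons, List.map_cons, List.sum_cons]
    have h0 : ((0 : Int), (0 : Int), t) = ((0 : Int), (0 : Int), (0 : Int) + t) := by norm_num
    rw [h0, inner_total_add, ih]
    ring

lemma B_closed (nums : List Int) :
    findScoreSum_alt nums = ((PySem.Set.ofList nums).map (G nums)).sum := by
  unfold findScoreSum_alt
  have hgroups : ∀ v, ((PySem.List.enumerate nums).foldl
      (fun d p => d.modify p.2 [] (fun l => l ++ [p.1])) PySem.Dict.empty).getD v []
      = gidx nums v := by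
    intro v
    have hmap : (PySem.List.enumerate nums).foldl
        (fun d p => d.modify p.2 [] (fun l => l ++ [p.1])) PySem.Dict.empty
        = ((PySem.List.enumerate nums).map (fun p => (p.2, p.1))).foldl
            (fun d p => d.modify p.1 [] (fun l => l ++ [p.2])) PySem.Dict.empty := by
      rw [List.foldl_map]
    rw [hmap, PySem.Dict.getD_foldl_modify_append]
    simp [gidx, List.filter_map, Function.comp_def]
  have hkeys : ((PySem.List.enumerate nums).foldl
      (fun d p => d.modify p.2 [] (fun l => l ++ [p.1])) PySem.Dict.empty).keys
      = PySem.Set.ofList nums := by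
    have := PySem.Dict.keys_foldl_modify_key (PySem.List.enumerate nums)
      (fun p => p.2) ([] : List Int) (fun _ p => fun l => l ++ [p.1]) PySem.Dict.empty
    simpa [PySem.List.map_snd_enumerate, PySem.Set.update, PySem.Set.ofList] using this
  simp only [hgroups, hkeys]
  have hstep : (fun (st : Int × Int × Int) (idx : Int) =>
      (st.1 + 1, st.2.1 + idx, st.2.2 + (st.1 * idx - st.2.1))) = innerStep := rfl
  rw [hstep, outer_fold, zero_add]
  apply congrArg
  apply List.map_congr_left
  intro v _
  rfl

lemma sum_map_zero_of_not_mem (s : List Int) (x δ : Int) (hx : x ∉ s) :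
    (s.map (fun v => if v = x then δ else 0)).sum = 0 := by
  induction s with
  | nil => simp
  | cons a as ih =>
    have h1 : a ≠ x := fun h => hx (by simp [h])
    have h2 : x ∉ as := fun h => hx (List.mem_cons_of_mem _ h)
    simp [h1, ih h2]

lemma sum_map_ite_of_nodup (s : List Int) (x δ : Int) (hnd : s.Nodup) (hx : x ∈ s) :
    (s.map (fun v => if v = x then δ else 0)).sum = δ := by
  induction s with
  | nil => simp at hx
  | cons a as ih =>
    rcases List.mem_cons.1 hx with rfl | h
    · simp [sum_map_zero_of_not_mem as x δ (List.nodup_cons.1 hnd).1]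
    · have hne : a ≠ x := by
        rintro rfl; exact (List.nodup_cons.1 hnd).1 h
      simp [hne, ih (List.nodup_cons.1 hnd).2 h]

lemma sum_map_add (s : List Int) (f g : Int → Int) :
    (s.map (fun v => f v + g v)).sum = (s.map f).sum + (s.map g).sum := by
  induction s with
  | nil => simp
  | cons a as ih => simp [ih]; ring

lemma G_append (l : List Int) (x v : Int) :
    G (l ++ [x]) v = G l v +
      (if v = x then ((gidx l x).length : Int) * (l.length : Int) - (gidx l x).sum else 0) := by
  unfold G
  rw [gidx_append]
  by_cases h : v = x
  · subst h
    simp only [if_pos rfl]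
    rw [List.foldl_append]
    obtain ⟨h1, h2⟩ := inner_fst_snd (gidx l v) 0 0 0
    rcases hs : (gidx l v).foldl innerStep (0, 0, 0) with ⟨k', p', t'⟩
    rw [hs] at h1 h2
    simp at h1 h2
    simp [innerStep, h1, h2]
  · have : ¬ (x = v) := fun hxv => h hxv.symm
    simp [this, h]

lemma B_append (l : List Int) (x : Int) :
    findScoreSum_alt (l ++ [x]) = findScoreSum_alt l +
      (((gidx l x).length : Int) * (l.length : Int) - (gidx l x).sum) := by
  rw [B_closed, B_closed]
  have hofl : PySem.Set.ofList (l ++ [x]) = PySem.Set.add (PySem.Set.ofList l) x := by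
    simp [PySem.Set.ofList, List.foldl_append]
  rw [hofl]
  by_cases hx : x ∈ l
  · have hmem : x ∈ PySem.Set.ofList l := (PySem.Set.mem_ofList l x).2 hx
    have hadd : PySem.Set.add (PySem.Set.ofList l) x = PySem.Set.ofList l := by
      simp [PySem.Set.add, List.contains_iff_mem, hmem]
    rw [hadd]
    have hmapeq : (PySem.Set.ofList l).map (G (l ++ [x]))
        = (PySem.Set.ofList l).map (fun v => G l v +
            (if v = x then ((gidx l x).length : Int) * (l.length : Int) - (gidx l x).sum else 0)) := by
      apply List.map_congr_left
      intro v _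
      exact G_append l x v
    rw [hmapeq, sum_map_add,
      sum_map_ite_of_nodup _ x _ (PySem.Set.nodup_ofList l) hmem]
  · have hnmem : x ∉ PySem.Set.ofList l := fun h => hx ((PySem.Set.mem_ofList l x).1 h)
    have hadd : PySem.Set.add (PySem.Set.ofList l) x = PySem.Set.ofList l ++ [x] := by
      simp [PySem.Set.add, List.contains_iff_mem, hnmem]
    rw [hadd, List.map_append, List.sum_append]
    have hmapeq : (PySem.Set.ofList l).map (G (l ++ [x]))
        = (PySem.Set.ofList l).map (G l) := by
      apply List.map_congr_left
      intro v hv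
      rw [G_append]
      have : v ≠ x := by rintro rfl; exact hnmem hv
      simp [this]
    rw [hmapeq]
    have hnil : gidx l x = [] := gidx_nil_of_not_mem l x hx
    have hGx : G (l ++ [x]) x = 0 := by
      unfold G
      rw [gidx_append, hnil]
      simp [innerStep]
    simp [hGx, hnil]

lemma main_invariant (nums : List Int) :
    (∀ v, (foldA nums).1.getD v (0, 0)
        = (((gidx nums v).length : Int), (gidx nums v).sum)) ∧
    (foldA nums).2 = findScoreSum_alt nums := by
  induction nums using List.reverseRecOn with
  | nil =>
    constructor
    · intro v
      simp [foldA, PySem.List.enumerate, gidx]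
    · simp [foldA, PySem.List.enumerate, findScoreSum_alt, PySem.List.enumerate]
  | append_singleton l x ih =>
    obtain ⟨ihd, iht⟩ := ih
    have hfold : foldA (l ++ [x]) = stepA (foldA l) ((l.length : Int), x) := by
      unfold foldA
      rw [PySem.List.enumerate_append, List.foldl_append]
      simp [PySem.List.enumerate]
    constructor
    · intro v
      rw [hfold]
      simp only [stepA, ihd x]
      rw [PySem.Dict.getD_insert]
      rw [gidx_append]
      by_cases h : v = x
      · subst h
        simp [List.sum_append]
      · have : ¬ (x = v) := fun hxv => h hxv.symm
        simp [h, this, ihd v]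
    · rw [hfold]
      simp only [stepA, ihd x, iht]
      rw [B_append]

-- ===== VERDICT (by name: the statement is the Claim_ definition above) =====
theorem findScoreSum_spec : Claim_equal_findScoreSum := by
  intro nums _
  unfold Spec_findScoreSum
  rw [findScoreSum_eq_foldA]
  exact (main_invariant nums).2
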